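-- pv_equiv track=rewrite | github.com/noyaams1/Python-projects | elevator_exer.py | final_elevator_floor
-- ===== SOURCE A (Python) =====
-- def final_elevator_floor(instructions):
--     current_floor=0
--     for i in instructions:
--         if i=='U':
--             current_floor+=1
--         elif i=='D' and current_floor > 0:
--             current_floor-=1
--     return current_floor
-- ===== SOURCE B (Python) =====
-- def final_elevator_floor(instructions):
--     total = 0
--     min_prefix = 0
--     for i in instructions:
--         if i == 'U':
--             total += 1
--         elif i == 'D':
--             total -= 1
--         if total < min_prefix:
--             min_prefix = total
--     return total - min_prefix
-- ===== Notes on version B (the rewrite author's own statement) =====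
-- stated objective: alternative
-- what changed: Replaces per-step clamping at zero by an unclamped prefix sum plus a tracked minimum prefix, returning total - min_prefix (Lindley identity).
import Mathlib
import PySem

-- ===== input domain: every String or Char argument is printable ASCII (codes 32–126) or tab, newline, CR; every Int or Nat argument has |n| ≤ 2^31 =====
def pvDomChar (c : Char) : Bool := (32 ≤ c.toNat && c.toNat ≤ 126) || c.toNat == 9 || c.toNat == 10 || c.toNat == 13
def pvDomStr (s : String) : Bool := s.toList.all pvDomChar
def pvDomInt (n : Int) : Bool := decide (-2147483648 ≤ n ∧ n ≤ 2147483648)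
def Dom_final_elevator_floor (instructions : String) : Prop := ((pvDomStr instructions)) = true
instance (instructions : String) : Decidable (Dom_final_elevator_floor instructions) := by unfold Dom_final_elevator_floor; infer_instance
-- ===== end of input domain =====

-- B replaces A's per-step clamping at zero by an unclamped prefix sum with a tracked minimum prefix, returning total - min_prefix.

-- ===== PORT A =====
def final_elevator_floor (instructions : String) : Int :=
  instructions.toList.foldl
    (fun current_floor i =>
      if i = 'U' then current_floor + 1
      else if i = 'D' ∧ current_floor > 0 then current_floor - 1
      else current_floor)
    0

-- ===== PORT B =====
def fefAltStep (st : Int × Int) (i : Char) : Int × Int :=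
  let total := if i = 'U' then st.1 + 1 else if i = 'D' then st.1 - 1 else st.1
  (total, if total < st.2 then total else st.2)

def final_elevator_floor_alt (instructions : String) : Int :=
  let st := instructions.toList.foldl fefAltStep (0, 0)
  st.1 - st.2

-- ===== PRECONDITION & SPEC =====
def Spec_final_elevator_floor (instructions : String) (out : Int) : Prop := out = final_elevator_floor_alt instructions
instance (instructions : String) (out : Int) : Decidable (Spec_final_elevator_floor instructions out) := by unfold Spec_final_elevator_floor; infer_instance

-- ===== CLAIM (what is proved, stated in full; the proofs are below) =====
def Claim_equal_final_elevator_floor : Prop := ∀ (instructions : String), Dom_final_elevator_floor instructions → Spec_final_elevator_floor instructions (final_elevator_floor instructions)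

-- ===== LEMMAS AND PROOFS =====

-- Invariant: starting A from (total - minp) with minp ≤ 0 ≤ total - minp matches B's fold.
theorem fef_loop_eq (l : List Char) : ∀ (total minp : Int), minp ≤ 0 → minp ≤ total →
    l.foldl
      (fun current_floor i =>
        if i = 'U' then current_floor + 1
        else if i = 'D' ∧ current_floor > 0 then current_floor - 1
        else current_floor)
      (total - minp)
    = (l.foldl fefAltStep (total, minp)).1 - (l.foldl fefAltStep (total, minp)).2 := by
  induction l with
  | nil => intro total minp _ _; simp
  | cons c t ih =>
    intro total minp h0 ht
    simp only [List.foldl_cons]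
    by_cases hU : c = 'U'
    · have e1 : (if c = 'U' then total - minp + 1 else if c = 'D' ∧ total - minp > 0 then total - minp - 1 else total - minp) = (total + 1) - minp := by
        rw [if_pos hU]; ring
      have e2 : fefAltStep (total, minp) c = (total + 1, minp) := by
        simp only [fefAltStep, Prod.mk.injEq, if_pos hU]
        exact ⟨trivial, by split_ifs <;> omega⟩
      rw [e1, e2]; exact ih (total + 1) minp h0 (by omega)
    · by_cases hD : c = 'D'
      · by_cases hpos : total - minp > 0
        · have e1 : (if c = 'U' then total - minp + 1 else if c = 'D' ∧ total - minp > 0 then total - minp - 1 else total - minp) = (total - 1) - minp := by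
            rw [if_neg hU, if_pos ⟨hD, hpos⟩]; ring
          have e2 : fefAltStep (total, minp) c = (total - 1, minp) := by
            simp only [fefAltStep, Prod.mk.injEq, if_neg hU, if_pos hD]
            exact ⟨trivial, by split_ifs <;> omega⟩
          rw [e1, e2]; exact ih (total - 1) minp h0 (by omega)
        · have e1 : (if c = 'U' then total - minp + 1 else if c = 'D' ∧ total - minp > 0 then total - minp - 1 else total - minp) = (total - 1) - (minp - 1) := by
            rw [if_neg hU, if_neg (fun h => hpos h.2)]; ring
          have e2 : fefAltStep (total, minp) c = (total - 1, minp - 1) := by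
            simp only [fefAltStep, Prod.mk.injEq, if_neg hU, if_pos hD]
            exact ⟨trivial, by split_ifs <;> omega⟩
          rw [e1, e2]; exact ih (total - 1) (minp - 1) (by omega) (by omega)
      · have e1 : (if c = 'U' then total - minp + 1 else if c = 'D' ∧ total - minp > 0 then total - minp - 1 else total - minp) = total - minp := by
          rw [if_neg hU, if_neg (fun h => hD h.1)]
        have e2 : fefAltStep (total, minp) c = (total, minp) := by
          simp only [fefAltStep, Prod.mk.injEq, if_neg hU, if_neg hD]
          exact ⟨trivial, by split_ifs <;> omega⟩
        rw [e1, e2]; exact ih total minp h0 ht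

-- ===== VERDICT (by name: the statement is the Claim_ definition above) =====
theorem final_elevator_floor_spec : Claim_equal_final_elevator_floor := by
  intro s _
  unfold Spec_final_elevator_floor final_elevator_floor final_elevator_floor_alt
  have := fef_loop_eq s.toList 0 0 le_rfl le_rfl
  simpa using this
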